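-- pv_equiv track=rewrite | github.com/is13zg/next_game | brutforce_uno.py | have_card
-- ===== SOURCE A (Python) =====
-- def have_card(tec, mycards):
--     for x in mycards:
--         if x[0] == tec[0] or x[1] == tec[1]:
--             return x
--     for x in mycards:
--         if x[1] == 0:
--             return x
--     return None
-- ===== SOURCE B (Python) =====
-- def have_card(tec, mycards):
--     fallback = None
--     for x in mycards:
--         if x[0] == tec[0] or x[1] == tec[1]:
--             return x
--         if x[1] == 0 and fallback is None:
--             fallback = x
--     return fallback
-- ===== Notes on version B (the rewrite author's own statement) =====
-- stated objective: simpler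
-- what changed: Replaces A's two sequential scans of mycards with a single pass that returns the first tec-matching card immediately and carries the first wild card seen as a fallback returned after the loop.
import Mathlib
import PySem

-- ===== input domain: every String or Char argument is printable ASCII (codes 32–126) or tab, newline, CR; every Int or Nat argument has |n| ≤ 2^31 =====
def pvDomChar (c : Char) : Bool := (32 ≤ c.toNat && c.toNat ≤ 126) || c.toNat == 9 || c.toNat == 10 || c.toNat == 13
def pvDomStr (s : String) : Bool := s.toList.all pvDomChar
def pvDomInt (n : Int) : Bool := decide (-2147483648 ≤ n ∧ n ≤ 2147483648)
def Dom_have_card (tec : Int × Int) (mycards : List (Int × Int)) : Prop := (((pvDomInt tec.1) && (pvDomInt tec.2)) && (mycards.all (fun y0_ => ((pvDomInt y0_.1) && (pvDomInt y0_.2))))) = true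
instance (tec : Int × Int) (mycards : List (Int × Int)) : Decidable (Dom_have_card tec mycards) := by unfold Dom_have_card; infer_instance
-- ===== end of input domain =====

-- One honest line: B replaces A's two sequential scans with a single pass carrying a wild-card fallback (simpler).


-- ===== PORT A =====
-- A's first for-loop: return the first card matching tec by color or number
def scanTec (tec : Int × Int) : List (Int × Int) → Option (Int × Int)
  | [] => none
  | x :: xs => if x.1 = tec.1 ∨ x.2 = tec.2 then some x else scanTec tec xs

-- A's second for-loop: return the first wild card (x[1] == 0)
def scanWild : List (Int × Int) → Option (Int × Int)
  | [] => none
  | x :: xs => if x.2 = 0 then some x else scanWild xs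

def have_card (tec : Int × Int) (mycards : List (Int × Int)) : Option (Int × Int) :=
  match scanTec tec mycards with
  | some x => some x
  | none =>
    match scanWild mycards with
    | some x => some x
    | none => none

-- ===== PORT B =====
-- B's single loop, carrying the fallback variable as state
def altLoop (tec : Int × Int) : List (Int × Int) → Option (Int × Int) → Option (Int × Int)
  | [], fallback => fallback
  | x :: xs, fallback =>
    if x.1 = tec.1 ∨ x.2 = tec.2 then some x
    else altLoop tec xs (if x.2 = 0 ∧ fallback = none then some x else fallback)

def have_card_alt (tec : Int × Int) (mycards : List (Int × Int)) : Option (Int × Int) :=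
  altLoop tec mycards none

-- ===== PRECONDITION & SPEC =====
def Spec_have_card (tec : Int × Int) (mycards : List (Int × Int)) (out : Option (Int × Int)) : Prop := out = have_card_alt tec mycards
instance (tec : Int × Int) (mycards : List (Int × Int)) (out : Option (Int × Int)) : Decidable (Spec_have_card tec mycards out) := by unfold Spec_have_card; infer_instance

-- ===== CLAIM (what is proved, stated in full; the proofs are below) =====
def Claim_equal_have_card : Prop := ∀ (tec : Int × Int) (mycards : List (Int × Int)), Dom_have_card tec mycards → Spec_have_card tec mycards (have_card tec mycards)

-- ===== LEMMAS AND PROOFS =====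
theorem altLoop_eq (tec : Int × Int) (xs : List (Int × Int)) :
    ∀ fb : Option (Int × Int),
      altLoop tec xs fb =
        match scanTec tec xs with
        | some x => some x
        | none =>
          match fb with
          | some f => some f
          | none => scanWild xs := by
  induction xs with
  | nil => intro fb; cases fb <;> simp [altLoop, scanTec, scanWild]
  | cons x xs ih =>
    intro fb
    by_cases h : x.1 = tec.1 ∨ x.2 = tec.2
    · simp [altLoop, scanTec, h]
    · simp only [altLoop, scanTec, scanWild, if_neg h, ih]
      cases fb with
      | some f => simp
      | none =>
        by_cases hw : x.2 = 0 <;> simp [hw]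

-- ===== VERDICT (by name: the statement is the Claim_ definition above) =====
theorem have_card_spec : Claim_equal_have_card := by
  intro tec mycards _
  unfold Spec_have_card have_card have_card_alt
  rw [altLoop_eq]
  cases scanTec tec mycards <;> cases h : scanWild mycards <;> simp
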